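-- pv_equiv track=rewrite | github.com/nothing015/nothing015 | CPS 109 - Assignmnet 2/PythonProblems-main/labs109.py | count_growlers
-- ===== SOURCE A (Python) =====
-- def count_growlers(animals):
--     growling = 0
--     for a in range(len(animals)):
--         animal = animals[a]
--         if animals[a] == 'cat' or animals[a] == 'dog':
--             if a != 0:
--                 i = a - 1
--                 cats = 0
--                 dogs = 0
--                 while i >= 0:
--                     if animals[i] == 'cat' or animals[i] == 'tac':
--                         cats += 1
--                     else:
--                         dogs += 1
--                     i -= 1
--                 if dogs > cats:
--                     growling += 1
--         else:
--             if a != len(animals)-1: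
--                 i = a + 1
--                 cats = 0
--                 dogs = 0
--                 while i < len(animals):
--                     if animals[i] == 'cat' or animals[i] == 'tac':
--                         cats += 1
--                     else:
--                         dogs += 1
--                     i += 1
--                 if dogs > cats:
--                     growling += 1
--
--     return growling
--
--     return growling
-- ===== SOURCE B (Python) =====
-- def count_growlers(animals):
--     n = len(animals)
--     tot_c = sum(1 for x in animals if x in ('cat', 'tac'))
--     tot_d = n - tot_c
--     growl = 0
--     c = d = 0
--     for a, x in enumerate(animals):
--         if x in ('cat', 'dog'):
--             if a != 0 and d > c:
--                 growl += 1
--         else: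
--             cx = 1 if x in ('cat', 'tac') else 0
--             if a != n - 1 and (tot_d - d - (1 - cx)) > (tot_c - c - cx):
--                 growl += 1
--         if x in ('cat', 'tac'):
--             c += 1
--         else:
--             d += 1
--     return growl
-- ===== Notes on version B (the rewrite author's own statement) =====
-- stated objective: faster
-- what changed: A rescans the whole prefix (or suffix) of the list for every cat/dog animal; B precomputes the total cat/dog counts once and maintains running prefix counters in a single pass, deriving each suffix count by subtraction.
import Mathlib
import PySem

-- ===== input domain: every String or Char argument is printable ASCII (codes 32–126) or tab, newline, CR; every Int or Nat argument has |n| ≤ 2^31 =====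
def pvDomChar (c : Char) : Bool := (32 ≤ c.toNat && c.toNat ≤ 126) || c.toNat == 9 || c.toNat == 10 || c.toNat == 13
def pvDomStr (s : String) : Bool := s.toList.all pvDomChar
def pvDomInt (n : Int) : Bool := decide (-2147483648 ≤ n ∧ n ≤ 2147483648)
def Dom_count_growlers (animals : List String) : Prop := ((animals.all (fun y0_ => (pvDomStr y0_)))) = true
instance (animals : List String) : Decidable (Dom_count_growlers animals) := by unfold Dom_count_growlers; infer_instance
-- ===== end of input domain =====

-- B replaces A's per-animal rescan of the whole list with one pass over running
-- prefix counters plus precomputed totals (O(n) instead of O(n^2)); objective: faster.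


-- ===== PORT A =====
-- the inner while loops of A scan the indices a-1..0 (resp. a+1..n-1) and count
-- cats ('cat'/'tac') vs everything else; pvWhileCount does exactly that counting over
-- the corresponding element list ((animals.take a).reverse, resp. animals.drop (a+1)).
def pvWhileCount : List String → Int × Int
  | [] => (0, 0)
  | x :: t =>
      let cd := pvWhileCount t
      if x == "cat" || x == "tac" then (cd.1 + 1, cd.2) else (cd.1, cd.2 + 1)

def pvALoop (animals : List String) (a : Nat) (growling : Int) : Int :=
  if h : a < animals.length then
    let animal := animals.getD a ""
    let growling' :=
      if animal == "cat" || animal == "dog" then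
        if a ≠ 0 then
          let cd := pvWhileCount ((animals.take a).reverse)
          if cd.2 > cd.1 then growling + 1 else growling
        else growling
      else
        if a ≠ animals.length - 1 then
          let cd := pvWhileCount (animals.drop (a + 1))
          if cd.2 > cd.1 then growling + 1 else growling
        else growling
    pvALoop animals (a + 1) growling'
  else growling
  termination_by animals.length - a

def count_growlers (animals : List String) : Int := pvALoop animals 0 0

-- ===== PORT B =====
def pvCatTotal : List String → Int
  | [] => 0
  | x :: t => (if x == "cat" || x == "tac" then 1 else 0) + pvCatTotal t

def pvBLoop (totC totD : Int) (n : Nat) (g c d : Int) (a : Nat) : List String → Int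
  | [] => g
  | x :: t =>
      let isC : Bool := x == "cat" || x == "tac"
      let g' :=
        if x == "cat" || x == "dog" then
          if a ≠ 0 ∧ d > c then g + 1 else g
        else
          let cx : Int := if isC then 1 else 0
          if a ≠ n - 1 ∧ (totD - d - (1 - cx)) > (totC - c - cx) then g + 1 else g
      pvBLoop totC totD n g' (if isC then c + 1 else c) (if isC then d else d + 1) (a + 1) t

def count_growlers_alt (animals : List String) : Int :=
  let n := animals.length
  let totC := pvCatTotal animals
  let totD : Int := (n : Int) - totC
  pvBLoop totC totD n 0 0 0 0 animals

-- ===== PRECONDITION & SPEC =====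
def Spec_count_growlers (animals : List String) (out : Int) : Prop := out = count_growlers_alt animals
instance (animals : List String) (out : Int) : Decidable (Spec_count_growlers animals out) := by unfold Spec_count_growlers; infer_instance

-- ===== CLAIM (what is proved, stated in full; the proofs are below) =====
def Claim_equal_count_growlers : Prop := ∀ (animals : List String), Dom_count_growlers animals → Spec_count_growlers animals (count_growlers animals)

-- ===== LEMMAS AND PROOFS =====

theorem pvWhileCount_append (l₁ l₂ : List String) :
    pvWhileCount (l₁ ++ l₂) =
      ((pvWhileCount l₁).1 + (pvWhileCount l₂).1, (pvWhileCount l₁).2 + (pvWhileCount l₂).2) := by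
  induction l₁ with
  | nil => simp [pvWhileCount]
  | cons x t ih =>
      simp only [List.cons_append, pvWhileCount, ih]
      split <;> simp <;> ring

theorem pvWhileCount_reverse (l : List String) : pvWhileCount l.reverse = pvWhileCount l := by
  induction l with
  | nil => rfl
  | cons x t ih =>
      simp only [List.reverse_cons, pvWhileCount_append, ih, pvWhileCount]
      split <;> simp <;> ring

theorem pvCatTotal_eq (l : List String) : pvCatTotal l = (pvWhileCount l).1 := by
  induction l with
  | nil => rfl
  | cons x t ih => simp only [pvCatTotal, pvWhileCount, ih]; split <;> simp <;> ring

theorem pvWhileCount_len (l : List String) :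
    (pvWhileCount l).1 + (pvWhileCount l).2 = (l.length : Int) := by
  induction l with
  | nil => rfl
  | cons x t ih =>
      simp only [pvWhileCount, List.length_cons]
      split <;> simp <;> push_cast <;> omega

theorem pv_main (l : List String) : ∀ (pre : List String) (g : Int),
    pvALoop (pre ++ l) pre.length g =
      pvBLoop (pvCatTotal (pre ++ l)) (((pre ++ l).length : Int) - pvCatTotal (pre ++ l))
        (pre ++ l).length g (pvWhileCount pre).1 (pvWhileCount pre).2 pre.length l := by
  induction l with
  | nil =>
      intro pre g
      rw [pvALoop]
      simp [pvBLoop]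
  | cons x t ih =>
      intro pre g
      have hlen : pre.length < (pre ++ x :: t).length := by simp
      rw [pvALoop]
      simp only [dif_pos hlen]
      have hget : (pre ++ x :: t).getD pre.length "" = x := by
        simp [List.getD]
      have htake : (pre ++ x :: t).take pre.length = pre := by
        simpa using List.take_left pre (x :: t)
      have hdrop : (pre ++ x :: t).drop (pre.length + 1) = t := by
        rw [show pre ++ x :: t = (pre ++ [x]) ++ t by simp,
            show pre.length + 1 = (pre ++ [x]).length by simp]
        exact List.drop_left
      have hcatx : pvCatTotal (pre ++ x :: t) =
          (pvWhileCount pre).1 + (if x == "cat" || x == "tac" then (1 : Int) else 0) + (pvWhileCount t).1 := by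
        rw [pvCatTotal_eq, show pre ++ x :: t = (pre ++ [x]) ++ t by simp, pvWhileCount_append,
            pvWhileCount_append]
        simp only [pvWhileCount]
        split <;> simp
      have hlens : ((pre ++ x :: t).length : Int) = (pre.length : Int) + 1 + (t.length : Int) := by
        simp
        push_cast
        ring
      have hpre := pvWhileCount_len pre
      have ht := pvWhileCount_len t
      have h1 : (pvWhileCount (pre ++ [x])).1 =
          if x == "cat" || x == "tac" then (pvWhileCount pre).1 + 1 else (pvWhileCount pre).1 := by
        rw [pvWhileCount_append]
        simp only [pvWhileCount]
        split <;> simp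
      have h2 : (pvWhileCount (pre ++ [x])).2 =
          if x == "cat" || x == "tac" then (pvWhileCount pre).2 else (pvWhileCount pre).2 + 1 := by
        rw [pvWhileCount_append]
        simp only [pvWhileCount]
        split <;> simp
      have hstep : ∀ g' : Int,
          pvALoop (pre ++ x :: t) (pre.length + 1) g' =
            pvBLoop (pvCatTotal (pre ++ x :: t))
              (((pre ++ x :: t).length : Int) - pvCatTotal (pre ++ x :: t)) (pre ++ x :: t).length g'
              (if x == "cat" || x == "tac" then (pvWhileCount pre).1 + 1 else (pvWhileCount pre).1)
              (if x == "cat" || x == "tac" then (pvWhileCount pre).2 else (pvWhileCount pre).2 + 1)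
              (pre.length + 1) t := by
        intro g'
        have hx := ih (pre ++ [x]) g'
        rw [show (pre ++ [x]) ++ t = pre ++ x :: t by simp] at hx
        simp only [List.length_append, List.length_cons, List.length_nil, Nat.zero_add] at hx ⊢
        rw [hx, h1, h2]
      rw [hget, htake, hdrop, pvWhileCount_reverse, hstep]
      conv_rhs => rw [pvBLoop]
      simp only
      congr 1
      -- the two updated growl counters agree
      by_cases hcd : (x == "cat" || x == "dog") = true
      · rw [if_pos hcd, if_pos hcd]
        split_ifs with hA hB hB hC <;> first | rfl | tauto
      · rw [if_neg hcd, if_neg hcd]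
        have hcond :
            ((↑(pre ++ x :: t).length - pvCatTotal (pre ++ x :: t) - (pvWhileCount pre).2 -
                (1 - if (x == "cat" || x == "tac") = true then (1 : Int) else 0) >
              pvCatTotal (pre ++ x :: t) - (pvWhileCount pre).1 -
                if (x == "cat" || x == "tac") = true then (1 : Int) else 0) ↔
             ((pvWhileCount t).2 > (pvWhileCount t).1)) := by
          rw [hcatx, hlens]
          split <;> (constructor <;> intro <;> omega)
        by_cases hn : pre.length ≠ (pre ++ x :: t).length - 1
        · rw [if_pos hn]
          simp only [hcond, hn, ne_eq, not_false_iff, true_and]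
        · rw [if_neg hn, if_neg (fun h => hn h.1)]

-- ===== VERDICT (by name: the statement is the Claim_ definition above) =====
theorem count_growlers_spec : Claim_equal_count_growlers := by
  intro animals _
  unfold Spec_count_growlers count_growlers count_growlers_alt
  have := pv_main animals [] 0
  simpa [pvWhileCount] using this
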